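-- pv_equiv track=rewrite | github.com/vladiH/peruvian_sign_language_translation | data/rawToHdf5.py | count
-- ===== SOURCE A (Python) =====
-- def count(input_list):
--     data  = {}
--     for line in input_list:
--         label_range = line.index("_")
--         label = line[:label_range]
--         if label in data:
--             data[label] += [line]
--         else:
--             data[label] = [line]
--     return data
-- ===== SOURCE B (Python) =====
-- def count(input_list):
--     # Two-pass grouping: first collect each prefix in first-occurrence order
--     # via dict.fromkeys, then build each group with one filtering comprehension.
--     def label(line):
--         return line[:line.index("_")]
--     order = dict.fromkeys(label(line) for line in input_list)
--     return {k: [line for line in input_list if label(line) == k] for k in order}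
-- ===== Notes on version B (the rewrite author's own statement) =====
-- stated objective: alternative
-- what changed: A builds the groups in one pass with a running dict and a membership branch; B makes two passes: dict.fromkeys collects the distinct prefix keys in first-occurrence order, then one filtering comprehension per key builds its group.
import Mathlib
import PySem

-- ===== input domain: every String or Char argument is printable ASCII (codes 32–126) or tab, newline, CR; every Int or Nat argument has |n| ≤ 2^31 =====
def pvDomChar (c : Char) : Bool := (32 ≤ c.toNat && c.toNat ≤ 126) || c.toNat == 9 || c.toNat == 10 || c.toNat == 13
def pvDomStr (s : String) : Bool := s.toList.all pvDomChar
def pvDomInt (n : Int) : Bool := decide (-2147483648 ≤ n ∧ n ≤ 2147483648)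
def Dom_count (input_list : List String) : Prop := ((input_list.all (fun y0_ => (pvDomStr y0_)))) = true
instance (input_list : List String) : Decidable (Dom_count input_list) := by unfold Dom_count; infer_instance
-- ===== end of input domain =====

-- B replaces A's one-pass dict accumulation by a two-pass grouping (ordered dedup of the
-- prefix keys, then one filter per key); objective: alternative decomposition, not faster.

-- ===== PORT A =====
-- A: one pass; a running dict maps each prefix-before-'_' to the lines seen so far.
def count (input_list : List String) : List (String × List String) :=
  (input_list.foldl
    (fun (data : PySem.Dict String (List String)) line =>
      let label_range : Int := PySem.Str.find line "_"   -- line.index("_"); -1 only where Python raises (outside Pre_)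
      let label : String := PySem.Str.slice line none (some label_range)
      if data.contains label then
        data.insert label (data.getD label [] ++ [line])
      else
        data.insert label [line])
    PySem.Dict.empty).items

-- ===== PORT B =====
-- line[:line.index("_")]  (index raises where '_' is absent — excluded by Pre_)
def pyLabel (line : String) : String :=
  PySem.Str.slice line none (some (PySem.Str.find line "_"))

def count_alt (input_list : List String) : List (String × List String) :=
  let order := PySem.List.dedup (input_list.map pyLabel)   -- dict.fromkeys(...)
  order.map (fun k => (k, input_list.filter (fun line => pyLabel line == k)))

-- ===== PRECONDITION & SPEC =====
-- Pre_ excludes exactly the lines with no '_', on which Python's str.index raises ValueError in both programs.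
def Pre_count (input_list : List String) : Prop :=
  ∀ line ∈ input_list, PySem.Str.isIn "_" line = true

instance (input_list : List String) : Decidable (Pre_count input_list) := by
  unfold Pre_count; infer_instance

def pvWitness_count : List String := ["ab_1", "c_2", "ab_3x", "_y"]

def Spec_count (input_list : List String) (out : List (String × List String)) : Prop := out = count_alt input_list
instance (input_list : List String) (out : List (String × List String)) : Decidable (Spec_count input_list out) := by unfold Spec_count; infer_instance

-- ===== CLAIM (what is proved, stated in full; the proofs are below) =====
def Claim_equal_count : Prop := ∀ (input_list : List String), Dom_count input_list → Pre_count input_list → Spec_count input_list (count input_list)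

-- ===== LEMMAS AND PROOFS =====

-- A's loop body is exactly 'data[label] = data.get(label, []) + [line]', i.e. a Dict.modify.
theorem count_step_eq :
    (fun (data : PySem.Dict String (List String)) line =>
      let label_range : Int := PySem.Str.find line "_"
      let label : String := PySem.Str.slice line none (some label_range)
      if data.contains label then
        data.insert label (data.getD label [] ++ [line])
      else
        data.insert label [line])
    = (fun (data : PySem.Dict String (List String)) line =>
        data.modify (pyLabel line) [] (· ++ [line])) := by
  funext data line
  show (if data.contains (pyLabel line) then
          data.insert (pyLabel line) (data.getD (pyLabel line) [] ++ [line])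
        else data.insert (pyLabel line) [line]) = _
  by_cases h : data.contains (pyLabel line) = true
  · rw [if_pos h]; exact PySem.Dict.ext_iff.mpr rfl
  · rw [if_neg h, PySem.Dict.ext_iff]
    have hd : data.getD (pyLabel line) [] = ([] : List String) :=
      PySem.Dict.getD_of_not_contains data [] (by simpa using h)
    show (data.insert (pyLabel line) [line]).items
        = (data.insert (pyLabel line) (data.getD (pyLabel line) [] ++ [line])).items
    rw [hd]; rfl

theorem count_eq_modify_fold (input_list : List String) :
    count input_list
      = (input_list.foldl
          (fun (d : PySem.Dict String (List String)) line =>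
            d.modify (pyLabel line) [] (· ++ [line])) PySem.Dict.empty).items := by
  unfold count
  rw [count_step_eq]

theorem count_fold_keys (input_list : List String) :
    (input_list.foldl
        (fun (d : PySem.Dict String (List String)) line =>
          d.modify (pyLabel line) [] (· ++ [line])) PySem.Dict.empty).keys
      = PySem.List.dedup (input_list.map pyLabel) := by
  rw [PySem.Dict.keys_foldl_modify_key input_list pyLabel []
      (fun _ line => (· ++ [line])) PySem.Dict.empty]
  rw [PySem.List.dedup_eq_ofList]
  simp [PySem.Set.update_nil_left]

theorem count_fold_getD (input_list : List String) (k : String) :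
    (input_list.foldl
        (fun (d : PySem.Dict String (List String)) line =>
          d.modify (pyLabel line) [] (· ++ [line])) PySem.Dict.empty).getD k []
      = input_list.filter (fun line => pyLabel line == k) := by
  have hmap : input_list.foldl
      (fun (d : PySem.Dict String (List String)) line =>
        d.modify (pyLabel line) [] (· ++ [line])) PySem.Dict.empty
      = (input_list.map (fun line => (pyLabel line, line))).foldl
          (fun d p => d.modify p.1 [] (· ++ [p.2])) PySem.Dict.empty := by
    rw [List.foldl_map]
  rw [hmap, PySem.Dict.getD_foldl_modify_append]
  simp [List.filter_map, Function.comp_def]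

-- ===== VERDICT (by name: the statement is the Claim_ definition above) =====
theorem count_spec : Claim_equal_count := by
  intro input_list _ _
  unfold Spec_count
  rw [count_eq_modify_fold]
  have hnd : (input_list.foldl
      (fun (d : PySem.Dict String (List String)) line =>
        d.modify (pyLabel line) [] (· ++ [line])) PySem.Dict.empty).keys.Nodup := by
    apply PySem.Dict.nodup_keys_foldl_modify_key input_list pyLabel []
      (fun _ line => (· ++ [line])) PySem.Dict.empty
    simp [PySem.Dict.keys_empty]
  rw [PySem.Dict.items_eq_map_keys _ hnd []]
  rw [count_fold_keys]
  unfold count_alt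
  exact List.map_congr_left (fun k _ => by rw [count_fold_getD])
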